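-- pv_equiv track=rewrite | github.com/faidros/sdrmottagare | modes/paging.py | bch_valid
-- ===== SOURCE A (Python) =====
-- BCH_GEN = 0b11101101001      # 0x769
--
-- def bch_valid(codeword: int) -> bool:
--     """Kontrollera BCH(31,21)-paritet för ett POCSAG-kodeord."""
--     # Kontrollera jämn paritet (bit 0)
--     if bin(codeword).count("1") % 2 != 0:
--         return False
--     # BCH-syndromberkäkning på 31 MSB
--     data = codeword >> 1
--     for i in range(20, -1, -1):
--         if data & (1 << (i + 10)):
--             data ^= BCH_GEN << i
--     return (data & 0x3FF) == 0
-- ===== SOURCE B (Python) =====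
-- BCH_GEN = 0b11101101001      # 0x769
--
-- def bch_valid(codeword: int) -> bool:
--     """Kontrollera BCH(31,21)-paritet för ett POCSAG-kodeord."""
--     # Kontrollera jämn paritet (bit 0)
--     if bin(codeword).count("1") % 2 != 0:
--         return False
--     # LSB-first: accumulate the XOR of per-column syndromes t = x^k mod g
--     data = codeword >> 1
--     s = 0
--     t = 1
--     for _ in range(31):
--         if data & 1:
--             s ^= t
--         data >>= 1
--         t <<= 1
--         if t & 0x400:
--             t ^= BCH_GEN
--     return s == 0
-- ===== Notes on version B (the rewrite author's own statement) =====
-- stated objective: alternative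
-- what changed: Replaces the MSB-first long division (XORing the shifted generator into the whole data word, scanning bits top-down) by an LSB-first single pass that consumes one data bit per step while maintaining the running column syndrome x^k mod g in a small register and accumulating the XOR of the syndromes of the set bits.
import Mathlib
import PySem

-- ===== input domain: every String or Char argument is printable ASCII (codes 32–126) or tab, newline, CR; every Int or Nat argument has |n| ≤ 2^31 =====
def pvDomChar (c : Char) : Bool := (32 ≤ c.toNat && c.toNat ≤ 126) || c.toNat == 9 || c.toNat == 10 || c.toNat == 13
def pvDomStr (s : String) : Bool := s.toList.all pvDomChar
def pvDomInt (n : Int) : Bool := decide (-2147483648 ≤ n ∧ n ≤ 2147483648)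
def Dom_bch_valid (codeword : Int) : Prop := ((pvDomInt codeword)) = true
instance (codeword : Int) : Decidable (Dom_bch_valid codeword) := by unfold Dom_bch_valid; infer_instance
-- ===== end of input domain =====

-- B replaces A's MSB-first long division over the whole data word by an LSB-first pass that
-- consumes one data bit per step, maintaining the running column syndrome x^k mod g in a small
-- register and accumulating the XOR of the syndromes of the set bits (alternative algorithm, no speed claim).

-- ===== PORT A =====
def BCH_GEN : Int := 1897  -- 0b11101101001

def bch_valid (codeword : Int) : Bool :=
  -- 'if bin(codeword).count("1") % 2 != 0: return False'
  if PySem.Str.count (PySem.Int.pyBin codeword) "1" % 2 ≠ 0 then false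
  else
    -- 'data = codeword >> 1'; then for i in range(20, -1, -1): long-division step.
    -- i runs over 20..0 (never negative), so '.toNat' on the shift amounts is exact.
    let data := codeword >>> 1
    let data := (PySem.List.pyRange 20 (-1) (-1)).foldl
      (fun d i =>
        if PySem.Int.band d ((1 : Int) <<< (i + 10).toNat) ≠ 0 then
          PySem.Int.bxor d (BCH_GEN <<< i.toNat)
        else d) data
    decide (PySem.Int.band data 1023 = 0)

-- ===== PORT B =====
-- one iteration of Source B's loop body over the state (s, t, data)
def bchStep (st : Int × Int × Int) : Int × Int × Int :=
  let s := st.1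
  let t := st.2.1
  let d := st.2.2
  let s := if PySem.Int.band d 1 ≠ 0 then PySem.Int.bxor s t else s
  let d := d >>> (1 : Int)
  let t := t <<< (1 : Int)
  let t := if PySem.Int.band t 1024 ≠ 0 then PySem.Int.bxor t BCH_GEN else t
  (s, t, d)

def bch_valid_alt (codeword : Int) : Bool :=
  if PySem.Str.count (PySem.Int.pyBin codeword) "1" % 2 ≠ 0 then false
  else
    -- s = 0; t = 1; for _ in range(31): <bchStep>
    let st := (PySem.List.pyRange 0 31 1).foldl (fun st _ => bchStep st)
      ((0 : Int), (1 : Int), codeword >>> 1)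
    decide (st.1 = 0)

-- ===== PRECONDITION & SPEC =====
def Spec_bch_valid (codeword : Int) (out : Bool) : Prop := out = bch_valid_alt codeword
instance (codeword : Int) (out : Bool) : Decidable (Spec_bch_valid codeword out) := by unfold Spec_bch_valid; infer_instance

-- ===== CLAIM (what is proved, stated in full; the proofs are below) =====
def Claim_equal_bch_valid : Prop := ∀ (codeword : Int), Dom_bch_valid codeword → Spec_bch_valid codeword (bch_valid codeword)

-- ===== LEMMAS AND PROOFS =====

-- ---- Nat-level bit facts ----
theorem natXor_shiftLeft_div (m g j : Nat) : (m ^^^ (g <<< j)) / 2 ^ j = (m / 2 ^ j) ^^^ g := by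
  rw [← Nat.shiftRight_eq_div_pow, ← Nat.shiftRight_eq_div_pow]
  apply Nat.eq_of_testBit_eq
  intro i
  simp [Nat.testBit_shiftRight, Nat.testBit_xor, Nat.testBit_shiftLeft]

theorem natXor_shiftLeft_mod (m g j : Nat) : (m ^^^ (g <<< j)) % 2 ^ j = m % 2 ^ j := by
  apply Nat.eq_of_testBit_eq
  intro i
  simp only [Nat.testBit_mod_two_pow, Nat.testBit_xor, Nat.testBit_shiftLeft]
  by_cases h : i < j
  · simp [h, Nat.not_le.mpr h]
  · simp [h]

theorem natAnd_mask (m k : Nat) : m &&& (2 ^ k - 1) = m % 2 ^ k := by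
  apply Nat.eq_of_testBit_eq
  intro i
  simp [Nat.testBit_mod_two_pow]

theorem natCompl (k u : Nat) (h : u < 2 ^ k) : (2 ^ k - 1) ^^^ u = 2 ^ k - 1 - u := by
  calc (2 ^ k - 1) ^^^ u
      = ((BitVec.allOnes k) ^^^ (BitVec.ofNat k u)).toNat := by
        rw [BitVec.toNat_xor, BitVec.toNat_allOnes, BitVec.toNat_ofNat, Nat.mod_eq_of_lt h]
    _ = 2 ^ k - 1 - u := by
        rw [BitVec.xor_comm, BitVec.xor_allOnes, BitVec.toNat_not, BitVec.toNat_ofNat,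
          Nat.mod_eq_of_lt h]

theorem natComplXor (k u g : Nat) (hu : u < 2 ^ k) (hg : g < 2 ^ k) :
    (2 ^ k - 1 - u) ^^^ g = 2 ^ k - 1 - (u ^^^ g) := by
  rw [← natCompl k u hu, Nat.xor_assoc, natCompl k (u ^^^ g) (Nat.xor_lt_two_pow hu hg)]

-- ---- Int division/mod facts for the negative two's-complement representative -(m+1) ----
theorem negOne_sub_divmod (m b : Nat) (hb : 0 < b) :
    (-(m : Int) - 1) / (b : Int) = -((m / b : Nat) : Int) - 1 ∧
    (-(m : Int) - 1) % (b : Int) = ((b - 1 - m % b : Nat) : Int) := by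
  have hb' : (0 : Int) < (b : Int) := by exact_mod_cast hb
  have hmod : m % b < b := Nat.mod_lt _ hb
  have hm' : ((b : Int)) * ((m / b : Nat) : Int) + ((m % b : Nat) : Int) = (m : Int) := by
    exact_mod_cast Nat.div_add_mod m b
  have hcast : ((b - 1 - m % b : Nat) : Int) = (b : Int) - 1 - ((m % b : Nat) : Int) := by omega
  exact (Int.ediv_emod_unique (a := -(m : Int) - 1) (b := (b : Int))
      (r := ((b - 1 - m % b : Nat) : Int)) (q := -((m / b : Nat) : Int) - 1) hb').mpr
    ⟨by rw [hcast]; linear_combination -hm', by omega, by omega⟩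

theorem cast_pow2 (j : Nat) : ((2 ^ j : Nat) : Int) = (2 : Int) ^ j := by push_cast; ring

theorem bxor_neg_left (m g : Nat) :
    PySem.Int.bxor (-(m : Int) - 1) (g : Int) = -((m ^^^ g : Nat) : Int) - 1 := by
  rw [PySem.Int.bxor]
  have h1 : ¬ (0 : Int) ≤ -(m : Int) - 1 := by omega
  have h2 : (0 : Int) ≤ (g : Int) := by positivity
  simp only [h1, h2, if_false, if_pos]
  norm_num

theorem band_neg_left (m b : Nat) :
    PySem.Int.band (-(m : Int) - 1) (b : Int) = ((b - (b &&& m) : Nat) : Int) := by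
  rw [PySem.Int.band]
  have h1 : ¬ (0 : Int) ≤ -(m : Int) - 1 := by omega
  have h2 : (0 : Int) ≤ (b : Int) := by positivity
  simp only [h1, h2, if_false, if_pos]
  norm_num

-- ---- Int-level facts about the PySem bit operations ----
theorem bxor_emod_pow (a : Int) (g k : Nat) (hg : g < 2 ^ k) :
    PySem.Int.bxor a (g : Int) % (2 : Int) ^ k = PySem.Int.bxor (a % (2 : Int) ^ k) (g : Int) := by
  have hp : (0:Nat) < 2 ^ k := by positivity
  by_cases h : 0 ≤ a
  · obtain ⟨m, rfl⟩ := Int.eq_ofNat_of_zero_le h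
    rw [PySem.Int.bxor_natCast, ← cast_pow2, ← Int.natCast_mod, ← Int.natCast_mod,
      PySem.Int.bxor_natCast, Nat.xor_mod_two_pow, Nat.mod_eq_of_lt hg]
  · have ha : a = -(((-a - 1).toNat : Nat) : Int) - 1 := by omega
    set m := (-a - 1).toNat with hm
    rw [ha, bxor_neg_left, ← cast_pow2,
      (negOne_sub_divmod (m ^^^ g) (2 ^ k) hp).2,
      (negOne_sub_divmod m (2 ^ k) hp).2]
    have h1 : (m ^^^ g) % 2 ^ k = (m % 2 ^ k) ^^^ g := by
      rw [Nat.xor_mod_two_pow, Nat.mod_eq_of_lt hg]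
    calc ((2 ^ k - 1 - (m ^^^ g) % 2 ^ k : Nat) : Int)
        = ((2 ^ k - 1 - (m % 2 ^ k ^^^ g) : Nat) : Int) := by rw [h1]
      _ = (((2 ^ k - 1 - m % 2 ^ k) ^^^ g : Nat) : Int) := by
          rw [natComplXor k (m % 2 ^ k) g (Nat.mod_lt _ hp) hg]
      _ = PySem.Int.bxor (((2 ^ k - 1 - m % 2 ^ k : Nat) : Int)) (g : Int) := by
          rw [PySem.Int.bxor_natCast]

theorem band_pow2 (a : Int) (p : Nat) :
    (PySem.Int.band a ((2 : Int) ^ p) ≠ 0) ↔ (a / (2 : Int) ^ p) % 2 = 1 := by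
  have h2p : (0:Nat) < 2 ^ p := by positivity
  by_cases h : 0 ≤ a
  · obtain ⟨m, rfl⟩ := Int.eq_ofNat_of_zero_le h
    rw [← cast_pow2, PySem.Int.band_natCast, Nat.and_two_pow, ← Int.natCast_div,
      show ((2 : Int)) = ((2 : Nat) : Int) from rfl, ← Int.natCast_mod,
      Nat.testBit_eq_decide_div_mod_eq]
    by_cases hb : m / 2 ^ p % 2 = 1
    · simp [hb]
    · have h0 : m / 2 ^ p % 2 = 0 := by omega
      simp [h0]
  · have ha : a = -(((-a - 1).toNat : Nat) : Int) - 1 := by omega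
    set m := (-a - 1).toNat with hm
    rw [ha, ← cast_pow2, band_neg_left,
      (negOne_sub_divmod m (2 ^ p) h2p).1, Nat.and_comm, Nat.and_two_pow,
      Nat.testBit_eq_decide_div_mod_eq]
    by_cases hb : m / 2 ^ p % 2 = 1 <;> simp only [hb, decide_true, decide_false,
      Bool.toNat_true, Bool.toNat_false, one_mul, zero_mul, Nat.sub_zero, Nat.sub_self]
    · constructor
      · intro hc; exact absurd rfl hc
      · intro hc; exfalso; omega
    · constructor
      · intro _; omega
      · intro _; exact_mod_cast Nat.cast_ne_zero.mpr h2p.ne'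

theorem band_mask (a : Int) (k : Nat) :
    PySem.Int.band a ((2 : Int) ^ k - 1) = a % (2 : Int) ^ k := by
  have h2p : (0:Nat) < 2 ^ k := by positivity
  have hc : ((2 : Int) ^ k - 1) = (((2 ^ k - 1 : Nat)) : Int) := by push_cast [h2p]; ring
  by_cases h : 0 ≤ a
  · obtain ⟨m, rfl⟩ := Int.eq_ofNat_of_zero_le h
    rw [hc, PySem.Int.band_natCast, natAnd_mask, ← cast_pow2, ← Int.natCast_mod]
  · have ha : a = -(((-a - 1).toNat : Nat) : Int) - 1 := by omega
    set m := (-a - 1).toNat with hm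
    rw [ha, hc, band_neg_left, Nat.and_comm (2 ^ k - 1) m, natAnd_mask, ← cast_pow2,
      (negOne_sub_divmod m (2 ^ k) h2p).2]

theorem band_one_emod (x : Int) : PySem.Int.band x 1 = x % 2 := by
  rw [PySem.Int.band_one, PySem.Int.mod_eq_emod_of_pos (by norm_num)]

theorem one_shl (p : Nat) : (1 : Int) <<< ((p : Nat) : Int) = (2 : Int) ^ p := by
  rw [Int.shiftLeft_natCast_right, Int.shiftLeft_eq]
  ring

theorem shr_nat (a : Int) (p : Nat) : a >>> ((p : Nat) : Int) = a / (2 : Int) ^ p := by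
  rw [Int.shiftRight_natCast_right, Int.shiftRight_eq_div_pow]
  norm_num

theorem castShl (g j : Nat) : ((g : Int) <<< ((j : Nat) : Int)) = ((g <<< j : Nat) : Int) := by
  rw [Int.shiftLeft_natCast_right, Int.shiftLeft_eq, Nat.shiftLeft_eq]
  push_cast
  ring

-- div/mod exchange: the low-31 window commutes with dividing by 2^p
theorem emod_window (p : Nat) (hp : p ≤ 31) (d : Int) :
    (d % (2 : Int) ^ 31) / (2 : Int) ^ p = (d / (2 : Int) ^ p) % (2 : Int) ^ (31 - p) := by
  set q := d / (2 : Int) ^ 31 with hq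
  set r := d % (2 : Int) ^ 31 with hr
  have hsplit : (2 : Int) ^ 31 = 2 ^ p * 2 ^ (31 - p) := by
    rw [← pow_add]; congr 1; omega
  have hr0 : 0 ≤ r := Int.emod_nonneg d (by positivity)
  have hr1 : r < 2 ^ p * 2 ^ (31 - p) := by rw [← hsplit]; exact Int.emod_lt_of_pos d (by positivity)
  have hd : d = r + (2 : Int) ^ p * (2 ^ (31 - p) * q) := by
    have hbase : (2 : Int) ^ 31 * (d / 2 ^ 31) + d % 2 ^ 31 = d := Int.mul_ediv_add_emod d _
    have hmul : (2 : Int) ^ p * (2 ^ (31 - p) * q) = 2 ^ 31 * q := by rw [hsplit]; ring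
    rw [hmul, hq, hr]
    linarith [hbase]
  have hdiv : d / (2 : Int) ^ p = r / 2 ^ p + 2 ^ (31 - p) * q := by
    rw [hd, Int.add_mul_ediv_left _ _ (by positivity)]
  have hlt : r / (2 : Int) ^ p < 2 ^ (31 - p) := by
    rw [Int.ediv_lt_iff_lt_mul (by positivity)]
    calc r < 2 ^ p * 2 ^ (31 - p) := hr1
      _ = 2 ^ (31 - p) * 2 ^ p := by ring
  have hge : 0 ≤ r / (2 : Int) ^ p := Int.ediv_nonneg hr0 (by positivity)
  rw [hdiv, Int.add_mul_emod_self_left, Int.emod_eq_of_lt hge hlt]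

-- bit p of d (read arithmetically) is bit p of the low-31 window, for p < 31
theorem bitIff (p : Nat) (hp : p < 31) (d : Int) :
    ((d / (2 : Int) ^ p) % 2 = 1) ↔ ((d % (2 : Int) ^ 31).toNat).testBit p := by
  have hm : (((d % (2 : Int) ^ 31).toNat : Nat) : Int) = d % (2 : Int) ^ 31 :=
    Int.toNat_of_nonneg (Int.emod_nonneg d (by positivity))
  set m := (d % (2 : Int) ^ 31).toNat with hmm
  have hw := emod_window p (by omega) d
  have hdvd : (2 : Int) ∣ (2 : Int) ^ (31 - p) := dvd_pow_self 2 (by omega)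
  have h2 : ((m : Int)) / (2 : Int) ^ p % 2 = (d / (2 : Int) ^ p) % 2 := by
    rw [hm, hw, Int.emod_emod_of_dvd _ hdvd]
  have h3 : ((m / 2 ^ p % 2 : Nat) : Int) = (d / (2 : Int) ^ p) % 2 := by
    rw [← h2]
    push_cast
    rfl
  rw [Nat.testBit_eq_decide_div_mod_eq]
  constructor
  · intro h
    have : ((m / 2 ^ p % 2 : Nat) : Int) = 1 := by rw [h3, h]
    simp [show m / 2 ^ p % 2 = 1 by exact_mod_cast this]
  · intro h
    have h1 : m / 2 ^ p % 2 = 1 := by simpa using h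
    rw [← h3, h1]
    norm_num

-- ---- A's loop as a structural recursion over Int (transliteration target) ----
def stepA (j : Nat) (d : Int) : Int :=
  if PySem.Int.band d ((1 : Int) <<< ((j + 10 : Nat) : Int)) ≠ 0 then
    PySem.Int.bxor d (BCH_GEN <<< ((j : Nat) : Int))
  else d

def runA : Nat → Int → Int
  | 0, d => d
  | j + 1, d => runA j (stepA j d)

theorem foldA_run (n : Nat) (d : Int) :
    (PySem.List.pyRange ((n : Int) - 1) (-1) (-1)).foldl
      (fun d i =>
        if PySem.Int.band d ((1 : Int) <<< (i + 10).toNat) ≠ 0 then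
          PySem.Int.bxor d (BCH_GEN <<< i.toNat)
        else d) d = runA n d := by
  induction n generalizing d with
  | zero => rw [PySem.List.pyRange_neg_one_eq_nil (by norm_num)]; rfl
  | succ n ih =>
      rw [show ((n + 1 : Nat) : Int) - 1 = (n : Int) by push_cast; ring,
        PySem.List.pyRange_neg_one_cons (by omega)]
      have h1 : ((n : Int) + 10).toNat = n + 10 := by omega
      have h2 : ((n : Int)).toNat = n := Int.toNat_natCast n
      simp only [List.foldl_cons, h1, h2, ih]
      rfl

theorem unfoldA (cw : Int) :
    bch_valid cw = (if PySem.Str.count (PySem.Int.pyBin cw) "1" % 2 ≠ 0 then false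
      else decide (PySem.Int.band (runA 21 (cw >>> 1)) 1023 = 0)) := by
  have h := foldA_run 21 (cw >>> 1)
  rw [show ((21 : Nat) : Int) - 1 = 20 by norm_num] at h
  simp only [bch_valid, h]

-- ---- B's loop as iteration of bchStep ----
def runB : Nat → (Int × Int × Int) → (Int × Int × Int)
  | 0, st => st
  | n + 1, st => runB n (bchStep st)

theorem foldB_run (l : List Int) (st : Int × Int × Int) :
    l.foldl (fun st _ => bchStep st) st = runB l.length st := by
  induction l generalizing st with
  | nil => rfl
  | cons x xs ih => simp only [List.foldl_cons, List.length_cons, ih]; rfl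

theorem runB_succ' (n : Nat) (st : Int × Int × Int) :
    runB (n + 1) st = bchStep (runB n st) := by
  induction n generalizing st with
  | zero => rfl
  | succ n ih => exact ih (bchStep st)

theorem unfoldB (cw : Int) :
    bch_valid_alt cw = (if PySem.Str.count (PySem.Int.pyBin cw) "1" % 2 ≠ 0 then false
      else decide ((runB 31 ((0 : Int), (1 : Int), cw >>> 1)).1 = 0)) := by
  have h := foldB_run (PySem.List.pyRange 0 31 1) ((0 : Int), (1 : Int), cw >>> 1)
  rw [show (PySem.List.pyRange 0 31 1).length = 31 from by decide] at h
  simp only [bch_valid_alt, h]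

-- ---- Nat reference machinery ----
def stepAN (j : Nat) (x : Nat) : Nat :=
  if x.testBit (j + 10) then x ^^^ (1897 <<< j) else x

def runAN : Nat → Nat → Nat
  | 0, x => x
  | j + 1, x => runAN j (stepAN j x)

-- the column syndromes t_k = x^k mod g, as Source B's register recurrence computes them
def Tt : Nat → Nat
  | 0 => 1
  | k + 1 =>
      let u := Tt k <<< 1
      if u.testBit 10 then u ^^^ 1897 else u

-- XOR of the syndromes of the set bits below k
def sN (m : Nat) : Nat → Nat
  | 0 => 0
  | k + 1 => if m.testBit k then sN m k ^^^ Tt k else sN m k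

theorem xor_swap (a b c : Nat) : (a ^^^ c) ^^^ (b ^^^ c) = a ^^^ b := by
  apply Nat.eq_of_testBit_eq
  intro i
  simp only [Nat.testBit_xor]
  cases a.testBit i <;> cases b.testBit i <;> cases c.testBit i <;> rfl

theorem xor_right (a b c : Nat) : (a ^^^ b) ^^^ c = (a ^^^ c) ^^^ b := by
  apply Nat.eq_of_testBit_eq
  intro i
  simp only [Nat.testBit_xor]
  cases a.testBit i <;> cases b.testBit i <;> cases c.testBit i <;> rfl

theorem stepAN_lin (j x y : Nat) : stepAN j (x ^^^ y) = stepAN j x ^^^ stepAN j y := by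
  unfold stepAN
  rw [Nat.testBit_xor]
  by_cases hx : x.testBit (j + 10) <;> by_cases hy : y.testBit (j + 10)
  · rw [if_pos hx, if_pos hy, if_neg (by rw [hx, hy]; simp)]
    exact (xor_swap x y (1897 <<< j)).symm
  · have hy' : y.testBit (j + 10) = false := by simpa using hy
    rw [if_pos hx, if_neg hy, if_pos (by rw [hx, hy']; rfl)]
    exact xor_right x y (1897 <<< j)
  · have hx' : x.testBit (j + 10) = false := by simpa using hx
    rw [if_neg hx, if_pos hy, if_pos (by rw [hx', hy]; rfl)]
    exact Nat.xor_assoc x y (1897 <<< j)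
  · have hx' : x.testBit (j + 10) = false := by simpa using hx
    have hy' : y.testBit (j + 10) = false := by simpa using hy
    rw [if_neg hx, if_neg hy, if_neg (by rw [hx', hy']; simp)]

theorem runAN_lin (n x y : Nat) : runAN n (x ^^^ y) = runAN n x ^^^ runAN n y := by
  induction n generalizing x y with
  | zero => rfl
  | succ n ih => show runAN n (stepAN n (x ^^^ y)) = _; rw [stepAN_lin]; exact ih _ _

theorem runAN_zero (n : Nat) : runAN n 0 = 0 := by
  induction n with
  | zero => rfl
  | succ n ih => show runAN n (stepAN n 0) = 0; simpa [stepAN, Nat.zero_testBit] using ih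

-- the 31 column syndromes are exactly the masked results of A's division on single bits
set_option maxRecDepth 40000 in
theorem keybits : ∀ n < 31, runAN 21 (2 ^ n) % 1024 = Tt n := by decide

theorem xor_two_pow_add (x n : Nat) (h : x < 2 ^ n) : x ^^^ 2 ^ n = x + 2 ^ n := by
  have hp : (2 : Nat) ^ n = 1 <<< n := by simp [Nat.shiftLeft_eq]
  have hmod : (x ^^^ 1 <<< n) % 2 ^ n = x := by
    rw [natXor_shiftLeft_mod, Nat.mod_eq_of_lt h]
  have hdiv : (x ^^^ 1 <<< n) / 2 ^ n = 1 := by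
    rw [natXor_shiftLeft_div, Nat.div_eq_of_lt h]
    rfl
  have hdm := Nat.div_add_mod (x ^^^ 1 <<< n) (2 ^ n)
  rw [hdiv, hmod] at hdm
  rw [hp]
  omega

-- low-bit recurrence of mod
theorem mod_pow_succ_bit (m n : Nat) :
    m % 2 ^ (n + 1) = m % 2 ^ n + (m.testBit n).toNat * 2 ^ n := by
  have h1 : m % 2 ^ (n + 1) % 2 ^ n = m % 2 ^ n :=
    Nat.mod_mod_of_dvd m (pow_dvd_pow 2 (Nat.le_succ n))
  have h2 : m % 2 ^ (n + 1) / 2 ^ n = m / 2 ^ n % 2 := by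
    rw [pow_succ, Nat.mod_mul_right_div_self]
  have h3 := Nat.div_add_mod (m % 2 ^ (n + 1)) (2 ^ n)
  rw [h2, h1] at h3
  rw [Nat.testBit_eq_decide_div_mod_eq]
  by_cases hbv : m / 2 ^ n % 2 = 1
  · rw [hbv] at h3
    rw [hbv]
    norm_num
    omega
  · have h0 : m / 2 ^ n % 2 = 0 := by omega
    rw [h0] at h3
    rw [h0]
    norm_num
    omega

theorem natPartial (m : Nat) : ∀ n ≤ 31, runAN 21 (m % 2 ^ n) % 1024 = sN m n := by
  intro n
  induction n with
  | zero => intro _; simp [Nat.mod_one, runAN_zero, sN]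
  | succ n ih =>
      intro hn
      have hn' : n < 31 := by omega
      have hb := mod_pow_succ_bit m n
      show runAN 21 (m % 2 ^ (n + 1)) % 1024 = if m.testBit n then sN m n ^^^ Tt n else sN m n
      by_cases hbit : m.testBit n
      · have hlt : m % 2 ^ n < 2 ^ n := Nat.mod_lt _ (by positivity)
        have : m % 2 ^ (n + 1) = m % 2 ^ n ^^^ 2 ^ n := by
          rw [xor_two_pow_add _ _ hlt, hb, hbit]
          simp
        rw [this, runAN_lin, if_pos hbit,
          show (1024 : Nat) = 2 ^ 10 from by norm_num, Nat.xor_mod_two_pow,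
          ← show (1024 : Nat) = 2 ^ 10 from by norm_num,
          keybits n hn', ih (by omega)]
      · have : m % 2 ^ (n + 1) = m % 2 ^ n := by
          have hf : m.testBit n = false := by simpa using hbit
          rw [hb, hf]
          simp
        rw [this, if_neg hbit, ih (by omega)]

theorem natMain (m : Nat) (hm : m < 2 ^ 31) : runAN 21 m % 1024 = sN m 31 := by
  have := natPartial m 31 (le_refl 31)
  rwa [Nat.mod_eq_of_lt hm] at this

-- ---- bridging A's Int loop to the Nat reference ----
theorem stepBridge (n : Nat) (hn : n ≤ 20) (d : Int) :
    (stepA n d % (2 : Int) ^ 31).toNat = stepAN n ((d % (2 : Int) ^ 31).toNat) := by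
  set m := (d % (2 : Int) ^ 31).toNat with hmm
  have hcond : (PySem.Int.band d ((1 : Int) <<< ((n + 10 : Nat) : Int)) ≠ 0)
      ↔ m.testBit (n + 10) := by
    rw [one_shl, band_pow2]
    exact bitIff (n + 10) (by omega) d
  by_cases hb : m.testBit (n + 10)
  · rw [stepA, if_pos (hcond.mpr hb), stepAN, if_pos hb]
    have hglt : 1897 <<< n < 2 ^ 31 := by
      have : (1897 : Nat) <<< n ≤ 1897 <<< 20 := by
        simp only [Nat.shiftLeft_eq]
        exact Nat.mul_le_mul_left 1897 (Nat.pow_le_pow_right (by norm_num) hn)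
      calc 1897 <<< n ≤ 1897 <<< 20 := this
        _ < 2 ^ 31 := by norm_num [Nat.shiftLeft_eq]
    rw [show BCH_GEN = ((1897 : Nat) : Int) from rfl, castShl, bxor_emod_pow d _ 31 hglt]
    have hm : ((m : Nat) : Int) = d % (2 : Int) ^ 31 :=
      Int.toNat_of_nonneg (Int.emod_nonneg d (by positivity))
    rw [← hm, PySem.Int.bxor_natCast, Int.toNat_natCast]
  · rw [stepA, if_neg (fun hc => hb (hcond.mp hc)), stepAN, if_neg hb]

theorem runBridge : ∀ n, n ≤ 21 → ∀ d : Int,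
    (runA n d % (2 : Int) ^ 31).toNat = runAN n ((d % (2 : Int) ^ 31).toNat) := by
  intro n
  induction n with
  | zero => intro _ d; rfl
  | succ n ih =>
      intro hn d
      show (runA n (stepA n d) % (2 : Int) ^ 31).toNat = runAN n (stepAN n _)
      rw [← stepBridge n (by omega) d]
      exact ih (by omega) (stepA n d)

-- ---- the invariant of B's loop ----
theorem bInv (d : Int) : ∀ k, k ≤ 31 →
    runB k ((0 : Int), (1 : Int), d)
      = (((sN ((d % (2 : Int) ^ 31).toNat) k : Nat) : Int),
         ((Tt k : Nat) : Int), d / (2 : Int) ^ k) := by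
  intro k
  induction k with
  | zero =>
      intro _
      show ((0 : Int), (1 : Int), d) = _
      norm_num [sN, Tt]
  | succ k ih =>
      intro hk
      rw [runB_succ', ih (by omega)]
      set m := (d % (2 : Int) ^ 31).toNat with hmm
      have hcond1 : (PySem.Int.band (d / (2 : Int) ^ k) 1 ≠ 0) ↔ m.testBit k := by
        rw [band_one_emod]
        have h0 : 0 ≤ d / (2 : Int) ^ k % 2 := Int.emod_nonneg _ (by norm_num)
        have h1 : d / (2 : Int) ^ k % 2 < 2 := Int.emod_lt_of_pos _ (by norm_num)
        constructor
        · intro h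
          exact (bitIff k (by omega) d).mp (by omega)
        · intro h
          rw [(bitIff k (by omega) d).mpr h]
          norm_num
      have hd : (d / (2 : Int) ^ k) >>> (1 : Int) = d / (2 : Int) ^ (k + 1) := by
        rw [show (1 : Int) = ((1 : Nat) : Int) from rfl, shr_nat, pow_one,
          Int.ediv_ediv_of_nonneg (by positivity : (0 : Int) ≤ 2 ^ k), ← pow_succ]
      have ht1 : ((Tt k : Nat) : Int) <<< (1 : Int) = ((Tt k <<< 1 : Nat) : Int) := by
        rw [show (1 : Int) = ((1 : Nat) : Int) from rfl, castShl]
      have hcond2 : (PySem.Int.band ((Tt k <<< 1 : Nat) : Int) 1024 ≠ 0)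
          ↔ (Tt k <<< 1).testBit 10 := by
        rw [show (1024 : Int) = ((1024 : Nat) : Int) from rfl, PySem.Int.band_natCast,
          show (1024 : Nat) = 2 ^ 10 from by norm_num, Nat.and_two_pow]
        cases h : (Tt k <<< 1).testBit 10 <;> simp
      have hs : (if PySem.Int.band (d / (2 : Int) ^ k) 1 ≠ 0
            then PySem.Int.bxor ((sN m k : Nat) : Int) ((Tt k : Nat) : Int)
            else ((sN m k : Nat) : Int)) = ((sN m (k + 1) : Nat) : Int) := by
        by_cases hb : m.testBit k
        · rw [if_pos (hcond1.mpr hb), PySem.Int.bxor_natCast]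
          simp [sN, hb]
        · rw [if_neg (fun h => hb (hcond1.mp h))]
          simp [sN, hb]
      have ht : (if PySem.Int.band (((Tt k : Nat) : Int) <<< (1 : Int)) 1024 ≠ 0
            then PySem.Int.bxor (((Tt k : Nat) : Int) <<< (1 : Int)) BCH_GEN
            else (((Tt k : Nat) : Int) <<< (1 : Int))) = ((Tt (k + 1) : Nat) : Int) := by
        rw [ht1]
        by_cases hb : (Tt k <<< 1).testBit 10
        · rw [if_pos (hcond2.mpr hb), show BCH_GEN = ((1897 : Nat) : Int) from rfl,
            PySem.Int.bxor_natCast]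
          simp [Tt, hb]
        · rw [if_neg (fun h => hb (hcond2.mp h))]
          simp [Tt, hb]
      show (_, _, _) = (_, _, _)
      rw [← hs, ← ht, ← hd]

-- ===== VERDICT (by name: the statement is the Claim_ definition above) =====
theorem bch_valid_spec : Claim_equal_bch_valid := by
  intro cw _
  unfold Spec_bch_valid
  rw [unfoldA, unfoldB]
  by_cases hg : PySem.Str.count (PySem.Int.pyBin cw) "1" % 2 ≠ 0
  · rw [if_pos hg, if_pos hg]
  · rw [if_neg hg, if_neg hg]
    set d := cw >>> 1 with hdd
    set m := (d % (2 : Int) ^ 31).toNat with hmm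
    have h2 : 0 ≤ d % (2 : Int) ^ 31 := Int.emod_nonneg d (by positivity)
    have hmlt : m < 2 ^ 31 := by
      have h1 : d % (2 : Int) ^ 31 < (2 : Int) ^ 31 := Int.emod_lt_of_pos d (by positivity)
      have h3 : (m : Int) < 2147483648 := by
        rw [hmm, Int.toNat_of_nonneg h2]
        calc d % (2 : Int) ^ 31 < (2 : Int) ^ 31 := h1
          _ = 2147483648 := by norm_num
      rw [show (2 : Nat) ^ 31 = 2147483648 from by norm_num]
      exact_mod_cast h3
    have hA : PySem.Int.band (runA 21 d) 1023 = ((runAN 21 m % 1024 : Nat) : Int) := by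
      rw [show (1023 : Int) = (2 : Int) ^ 10 - 1 from by norm_num, band_mask,
        ← Int.emod_emod_of_dvd _ (pow_dvd_pow (2 : Int) (by norm_num : (10 : Nat) ≤ 31))]
      have hb := runBridge 21 (le_refl 21) d
      have hnn : 0 ≤ runA 21 d % (2 : Int) ^ 31 := Int.emod_nonneg _ (by positivity)
      have heq : runA 21 d % (2 : Int) ^ 31 = ((runAN 21 m : Nat) : Int) := by
        rw [← hb, Int.toNat_of_nonneg hnn]
      rw [heq, ← cast_pow2, ← Int.natCast_mod,
        show (2 : Nat) ^ 10 = 1024 from by norm_num]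
    have hB : (runB 31 ((0 : Int), (1 : Int), d)).1 = ((sN m 31 : Nat) : Int) := by
      rw [bInv d 31 (le_refl 31)]
    rw [hA, hB, natMain m hmlt]
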